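-- pv_equiv track=rewrite | github.com/piotrbizzle/3dtest | tools/mapify.py | _should_outline
-- ===== SOURCE A (Python) =====
-- def _should_outline(screen_array, x, y):
--     for i in (-2, 0, 2):
--         for j in (-2, 0, 2):
--             test_x = x + i
--             test_y = y + j
--
--             # outline screen edges always
--             if test_x < 0 or test_x >= len(screen_array):
--                 return True
--             if test_y < 0 or test_y >= len(screen_array[0]):
--                 return True
--             if screen_array[test_x][test_y] == -1:
--                 return True
--     return False
-- ===== SOURCE B (Python) =====
-- def _should_outline(screen_array, x, y):
--     # Outline whenever the +-2 window touches a screen edge (closed-form test);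
--     # otherwise carve the 3x3 neighbor block out with step-2 slices and ask
--     # whether -1 is a member of any sliced row.
--     if x - 2 < 0 or x + 2 >= len(screen_array) or y - 2 < 0 or y + 2 >= len(screen_array[0]):
--         return True
--     block = [row[y - 2:y + 3:2] for row in screen_array[x - 2:x + 3:2]]
--     return any(-1 in cells for cells in block)
-- ===== Notes on version B (the rewrite author's own statement) =====
-- stated objective: alternative
-- what changed: B replaces A's nested neighbor loops with interleaved per-neighbor bounds checks by one closed-form boundary test followed by carving the 3x3 neighbor block out with step-2 list slices and a membership test for -1.
import Mathlib
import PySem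

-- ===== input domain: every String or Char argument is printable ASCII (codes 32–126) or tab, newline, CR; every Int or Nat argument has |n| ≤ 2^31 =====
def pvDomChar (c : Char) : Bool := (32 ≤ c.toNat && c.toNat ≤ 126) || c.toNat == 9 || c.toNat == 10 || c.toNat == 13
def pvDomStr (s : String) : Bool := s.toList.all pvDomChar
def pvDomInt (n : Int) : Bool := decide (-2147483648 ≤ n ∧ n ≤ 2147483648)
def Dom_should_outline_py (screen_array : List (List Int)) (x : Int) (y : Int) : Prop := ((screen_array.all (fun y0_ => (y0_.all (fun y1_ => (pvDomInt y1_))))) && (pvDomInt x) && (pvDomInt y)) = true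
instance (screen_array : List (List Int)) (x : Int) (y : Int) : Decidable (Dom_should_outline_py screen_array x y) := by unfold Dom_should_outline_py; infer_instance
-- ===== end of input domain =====

-- B: closed-form edge test, then the 3x3 neighbor block is carved out with step-2
-- slices and -1 is looked for by membership (simpler decomposition; return value only).

-- ===== PORT A =====
-- screen_array[test_x][test_y]; under Pre_ both indices are in range when read,
-- so the getD defaults are never taken there.
def pvCellA (screen_array : List (List Int)) (tx ty : Int) : Int :=
  ((PySem.List.pyGet? screen_array tx).getD []) |> (fun row => (PySem.List.pyGet? row ty).getD 0)

-- the body of A's inner loop: the three early-return tests, in A's order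
def pvBodyA (screen_array : List (List Int)) (x y i j : Int) : Bool :=
  let test_x := x + i
  let test_y := y + j
  if test_x < 0 ∨ test_x ≥ (screen_array.length : Int) then true
  else if test_y < 0 ∨ test_y ≥ ((screen_array.headD []).length : Int) then true
  else pvCellA screen_array test_x test_y == -1

-- the two for-loops with early return = any over (-2, 0, 2) x (-2, 0, 2)
def should_outline_py (screen_array : List (List Int)) (x : Int) (y : Int) : Bool :=
  [(-2 : Int), 0, 2].any (fun i => [(-2 : Int), 0, 2].any (fun j => pvBodyA screen_array x y i j))

-- ===== PORT B =====
-- Source B: one boundary test; then block = [row[y-2:y+3:2] for row in screen_array[x-2:x+3:2]]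
-- (step-2 slices; slice? never fails since step = 2 ≠ 0, so getD [] is never taken),
-- and any(-1 in cells for cells in block).
def should_outline_py_alt (screen_array : List (List Int)) (x : Int) (y : Int) : Bool :=
  if x - 2 < 0 ∨ x + 2 ≥ (screen_array.length : Int)
      ∨ y - 2 < 0 ∨ y + 2 ≥ ((screen_array.headD []).length : Int) then
    true
  else
    let block := ((PySem.List.slice? screen_array (some (x - 2)) (some (x + 3)) 2).getD []).map
      (fun row => (PySem.List.slice? row (some (y - 2)) (some (y + 3)) 2).getD [])
    block.any (fun cells => cells.contains (-1 : Int))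

-- ===== PRECONDITION & SPEC =====
-- Pre_ excludes inputs where some neighbor cell screen_array[x+i][y+j] that passes the
-- row-0-length bound check lies beyond its own (shorter, jagged) row's end: there A's
-- indexing can raise IndexError (or A happens to return True before reaching that cell).
def Pre_should_outline_py (screen_array : List (List Int)) (x : Int) (y : Int) : Prop :=
  ∀ i ∈ [(-2 : Int), 0, 2], ∀ j ∈ [(-2 : Int), 0, 2],
    (0 ≤ x + i ∧ x + i < (screen_array.length : Int) ∧
     0 ≤ y + j ∧ y + j < ((screen_array.headD []).length : Int)) →
    y + j < ((screen_array.getD (x + i).toNat []).length : Int)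

instance (screen_array : List (List Int)) (x : Int) (y : Int) : Decidable (Pre_should_outline_py screen_array x y) := by unfold Pre_should_outline_py; infer_instance

def pvWitness_should_outline_py : List (List Int) × Int × Int :=
  ([[0, 0, 0, 0, 0], [0, 0, -1, 0, 0], [0, 0, 0, 0, 0], [0, 0, 0, 0, 0], [0, 0, 0, 0, 0]], 2, 2)

def Spec_should_outline_py (screen_array : List (List Int)) (x : Int) (y : Int) (out : Bool) : Prop := out = should_outline_py_alt screen_array x y
instance (screen_array : List (List Int)) (x : Int) (y : Int) (out : Bool) : Decidable (Spec_should_outline_py screen_array x y out) := by unfold Spec_should_outline_py; infer_instance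

-- ===== CLAIM (what is proved, stated in full; the proofs are below) =====
def Claim_equal_should_outline_py : Prop := ∀ (screen_array : List (List Int)) (x : Int) (y : Int), Dom_should_outline_py screen_array x y → Pre_should_outline_py screen_array x y → Spec_should_outline_py screen_array x y (should_outline_py screen_array x y)

-- ===== LEMMAS AND PROOFS =====

-- a Python step-2 slice of five slots starting at a nonnegative in-range index
theorem pv_slice2 {α : Type} [Inhabited α] (xs : List α) (s : Int) (h0 : 0 ≤ s) (h4 : s + 4 < (xs.length : Int)) :
    PySem.List.slice? xs (some s) (some (s + 5)) 2 =
      some [xs.getD s.toNat default, xs.getD (s.toNat + 2) default, xs.getD (s.toNat + 4) default] := by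
  unfold PySem.List.slice? PySem.List.sliceIndices
  simp only [if_neg (by norm_num : ¬ (2 : Int) = 0), if_neg (by norm_num : ¬ (2 : Int) < 0),
    if_neg (by omega : ¬ s < 0), if_neg (by omega : ¬ s + 5 < 0)]
  rw [show min s (xs.length : Int) = s by omega, show min (s + 5) (xs.length : Int) = s + 5 by omega,
    if_pos (by norm_num : (0 : Int) < 2), if_pos (by omega : s < s + 5),
    show ((s + 5 - s + 2 - 1) / 2 : Int).toNat = 3 by omega,
    show List.range 3 = [0, 1, 2] from rfl]
  have l0 : s.toNat < xs.length := by omega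
  have l1 : s.toNat + 2 < xs.length := by omega
  have l2 : s.toNat + 4 < xs.length := by omega
  have g0 : xs[(s + 2 * ((0 : Nat) : Int)).toNat]? = some xs[s.toNat] := by
    rw [show (s + 2 * ((0 : Nat) : Int)).toNat = s.toNat by omega]; exact List.getElem?_eq_getElem l0
  have g1 : xs[(s + 2).toNat]? = some xs[s.toNat + 2] := by
    rw [show (s + 2).toNat = s.toNat + 2 by omega]; exact List.getElem?_eq_getElem l1
  have g2 : xs[(s + 4).toNat]? = some xs[s.toNat + 4] := by
    rw [show (s + 4).toNat = s.toNat + 4 by omega]; exact List.getElem?_eq_getElem l2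
  simp [g0, g1, g2, List.getD_eq_getElem?_getD, l0, l1, l2]

-- Python xs[t] for a nonnegative in-range index, through the getD default
theorem pv_pyGetD_pos {α : Type} (xs : List α) (t : Int) (d : α) (h0 : 0 ≤ t) (h : t < (xs.length : Int)) :
    (PySem.List.pyGet? xs t).getD d = xs.getD t.toNat d := by
  simp only [PySem.List.pyGet?, PySem.List.pyIdx?]
  rw [if_pos h0, if_pos h]
  have : t.toNat < xs.length := by omega
  simp [this]

-- inside the screen, A's body reduces to the cell test
theorem pvBodyA_inside (screen_array : List (List Int)) (x y i j : Int)
    (hi : i = -2 ∨ i = 0 ∨ i = 2) (hj : j = -2 ∨ j = 0 ∨ j = 2)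
    (hx1 : 0 ≤ x - 2) (hx2 : x + 2 < (screen_array.length : Int))
    (hy1 : 0 ≤ y - 2) (hy2 : y + 2 < ((screen_array.headD []).length : Int)) :
    pvBodyA screen_array x y i j = (pvCellA screen_array (x + i) (y + j) == -1) := by
  unfold pvBodyA
  rw [if_neg (by omega), if_neg (by omega)]

theorem pv_boundary_A_true (screen_array : List (List Int)) (x y : Int)
    (h : x - 2 < 0 ∨ x + 2 ≥ (screen_array.length : Int)
        ∨ y - 2 < 0 ∨ y + 2 ≥ ((screen_array.headD []).length : Int)) :
    should_outline_py screen_array x y = true := by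
  unfold should_outline_py
  simp only [List.any_cons, List.any_nil, Bool.or_eq_true]
  by_cases hx1 : x - 2 < 0
  · exact Or.inl (Or.inl (by unfold pvBodyA; rw [if_pos (by omega)]))
  · by_cases hx2 : x + 2 ≥ (screen_array.length : Int)
    · exact Or.inr (Or.inr (Or.inl (Or.inl (by unfold pvBodyA; rw [if_pos (by omega)]))))
    · by_cases hy1 : y - 2 < 0
      · exact Or.inl (Or.inl (by unfold pvBodyA; rw [if_neg (by omega), if_pos (by omega)]))
      · have hy2 : y + 2 ≥ ((screen_array.headD []).length : Int) := by tauto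
        exact Or.inl (Or.inr (Or.inr (by unfold pvBodyA; rw [if_neg (by omega), if_pos (by omega)]; exact Or.inl rfl)))

-- ===== VERDICT (by name: the statement is the Claim_ definition above) =====
theorem should_outline_py_spec : Claim_equal_should_outline_py := by
  intro screen_array x y _hdom hpre
  unfold Spec_should_outline_py
  by_cases hb : x - 2 < 0 ∨ x + 2 ≥ (screen_array.length : Int)
      ∨ y - 2 < 0 ∨ y + 2 ≥ ((screen_array.headD []).length : Int)
  · rw [pv_boundary_A_true screen_array x y hb]
    unfold should_outline_py_alt
    rw [if_pos hb]
  · push_neg at hb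
    obtain ⟨hx1, hx2, hy1, hy2⟩ := hb
    have hdef : (default : List Int) = [] := rfl
    have hr0 : y + 2 < ((screen_array.getD (x + -2).toNat []).length : Int) :=
      hpre (-2) (by norm_num) 2 (by norm_num) ⟨by omega, by omega, by omega, by omega⟩
    have hr1 : y + 2 < ((screen_array.getD (x + 0).toNat []).length : Int) :=
      hpre 0 (by norm_num) 2 (by norm_num) ⟨by omega, by omega, by omega, by omega⟩
    have hr2 : y + 2 < ((screen_array.getD (x + 2).toNat []).length : Int) :=
      hpre 2 (by norm_num) 2 (by norm_num) ⟨by omega, by omega, by omega, by omega⟩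
    rw [show x + -2 = x - 2 by ring] at hr0
    rw [show x + 0 = x by ring] at hr1
    have e1 : x.toNat = (x - 2).toNat + 2 := by omega
    have e2 : (x + 2).toNat = (x - 2).toNat + 4 := by omega
    rw [e1] at hr1
    rw [e2] at hr2
    unfold should_outline_py_alt
    rw [if_neg (by omega)]
    rw [show x + 3 = (x - 2) + 5 by ring, show y + 3 = (y - 2) + 5 by ring]
    rw [pv_slice2 screen_array (x - 2) (by omega) (by omega)]
    simp only [Option.getD_some, List.map_cons, List.map_nil, hdef]
    rw [pv_slice2 (screen_array.getD (x - 2).toNat []) (y - 2) (by omega) (by omega),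
        pv_slice2 (screen_array.getD ((x - 2).toNat + 2) []) (y - 2) (by omega) (by omega),
        pv_slice2 (screen_array.getD ((x - 2).toNat + 4) []) (y - 2) (by omega) (by omega)]
    have hdef0 : (default : Int) = 0 := rfl
    have ey1 : y.toNat = (y - 2).toNat + 2 := by omega
    have ey2 : (y + 2).toNat = (y - 2).toNat + 4 := by omega
    unfold should_outline_py
    simp only [List.any_cons, List.any_nil]
    rw [pvBodyA_inside _ _ _ _ _ (by left; rfl) (by left; rfl) (by omega) (by omega) (by omega) (by omega),
        pvBodyA_inside _ _ _ _ _ (by left; rfl) (by right; left; rfl) (by omega) (by omega) (by omega) (by omega),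
        pvBodyA_inside _ _ _ _ _ (by left; rfl) (by right; right; rfl) (by omega) (by omega) (by omega) (by omega),
        pvBodyA_inside _ _ _ _ _ (by right; left; rfl) (by left; rfl) (by omega) (by omega) (by omega) (by omega),
        pvBodyA_inside _ _ _ _ _ (by right; left; rfl) (by right; left; rfl) (by omega) (by omega) (by omega) (by omega),
        pvBodyA_inside _ _ _ _ _ (by right; left; rfl) (by right; right; rfl) (by omega) (by omega) (by omega) (by omega),
        pvBodyA_inside _ _ _ _ _ (by right; right; rfl) (by left; rfl) (by omega) (by omega) (by omega) (by omega),
        pvBodyA_inside _ _ _ _ _ (by right; right; rfl) (by right; left; rfl) (by omega) (by omega) (by omega) (by omega),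
        pvBodyA_inside _ _ _ _ _ (by right; right; rfl) (by right; right; rfl) (by omega) (by omega) (by omega) (by omega)]
    unfold pvCellA
    simp only [show x + -2 = x - 2 from by ring, show x + 0 = x from by ring,
      show y + -2 = y - 2 from by ring, show y + 0 = y from by ring]
    rw [pv_pyGetD_pos screen_array (x - 2) [] (by omega) (by omega),
        pv_pyGetD_pos screen_array x [] (by omega) (by omega),
        pv_pyGetD_pos screen_array (x + 2) [] (by omega) (by omega)]
    rw [e1, e2]
    rw [pv_pyGetD_pos (screen_array.getD (x - 2).toNat []) (y - 2) 0 (by omega) (by omega),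
        pv_pyGetD_pos (screen_array.getD (x - 2).toNat []) y 0 (by omega) (by omega),
        pv_pyGetD_pos (screen_array.getD (x - 2).toNat []) (y + 2) 0 (by omega) (by omega),
        pv_pyGetD_pos (screen_array.getD ((x - 2).toNat + 2) []) (y - 2) 0 (by omega) (by omega),
        pv_pyGetD_pos (screen_array.getD ((x - 2).toNat + 2) []) y 0 (by omega) (by omega),
        pv_pyGetD_pos (screen_array.getD ((x - 2).toNat + 2) []) (y + 2) 0 (by omega) (by omega),
        pv_pyGetD_pos (screen_array.getD ((x - 2).toNat + 4) []) (y - 2) 0 (by omega) (by omega),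
        pv_pyGetD_pos (screen_array.getD ((x - 2).toNat + 4) []) y 0 (by omega) (by omega),
        pv_pyGetD_pos (screen_array.getD ((x - 2).toNat + 4) []) (y + 2) 0 (by omega) (by omega)]
    rw [ey1, ey2]
    simp [hdef0, Bool.or_assoc, BEq.comm, Bool.beq_eq_decide_eq]
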